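-- pv_equiv track=rewrite | github.com/Facuusosa/BRASIL-2026 | actualizar_catalogo.py | mejor_imagen
-- ===== SOURCE A (Python) =====
-- def mejor_imagen(imagenes):
--     """Elige la primera imagen que no sea placeholder 0000-."""
--     for img in imagenes:
--         if img and "/0000-" not in img:
--             return img
--     # Fallback: la primera que no esté vacía
--     for img in imagenes:
--         if img:
--             return img
--     return ""
-- ===== SOURCE B (Python) =====
-- def mejor_imagen(imagenes):
--     """Single pass: return the first non-placeholder non-empty image, keeping
--     the first non-empty one as fallback; '' if none is non-empty."""
--     fallback = None
--     for img in imagenes: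
--         if img and "/0000-" not in img:
--             return img
--         if img and fallback is None:
--             fallback = img
--     return fallback if fallback is not None else ""
-- ===== Notes on version B (the rewrite author's own statement) =====
-- stated objective: simpler
-- what changed: Replaced the two sequential scans (good image, then any non-empty image) by one pass that returns a good image immediately and maintains a first-non-empty fallback variable.
import Mathlib
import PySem

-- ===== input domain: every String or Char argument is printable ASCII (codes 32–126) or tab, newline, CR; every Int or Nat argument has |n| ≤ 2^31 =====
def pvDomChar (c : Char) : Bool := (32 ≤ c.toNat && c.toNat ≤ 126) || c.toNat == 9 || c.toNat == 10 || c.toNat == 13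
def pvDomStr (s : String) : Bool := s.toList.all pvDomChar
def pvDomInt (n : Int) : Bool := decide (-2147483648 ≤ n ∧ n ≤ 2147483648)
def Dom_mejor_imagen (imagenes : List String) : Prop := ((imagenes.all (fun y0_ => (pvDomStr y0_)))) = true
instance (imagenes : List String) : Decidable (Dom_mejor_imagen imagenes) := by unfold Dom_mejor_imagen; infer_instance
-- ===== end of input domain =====

-- B replaces A's two sequential scans by one pass with a first-non-empty fallback variable (objective: simpler).

-- ===== PORT A =====
-- first loop: first img with img truthy and "/0000-" not in img
def mejorImagenLoop1 : List String → Option String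
  | [] => none
  | img :: t =>
    if img ≠ "" ∧ PySem.Str.isIn "/0000-" img = false then some img
    else mejorImagenLoop1 t

-- second loop: first truthy img
def mejorImagenLoop2 : List String → Option String
  | [] => none
  | img :: t => if img ≠ "" then some img else mejorImagenLoop2 t

def mejor_imagen (imagenes : List String) : String :=
  match mejorImagenLoop1 imagenes with
  | some img => img
  | none =>
    match mejorImagenLoop2 imagenes with
    | some img => img
    | none => ""

-- ===== PORT B =====
def mejorImagenAltLoop : List String → Option String → String
  | [], fallback => match fallback with | some f => f | none => ""
  | img :: t, fallback =>
    if img ≠ "" ∧ PySem.Str.isIn "/0000-" img = false then img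
    else mejorImagenAltLoop t
      (if img ≠ "" ∧ fallback = none then some img else fallback)

def mejor_imagen_alt (imagenes : List String) : String :=
  mejorImagenAltLoop imagenes none

-- ===== PRECONDITION & SPEC =====
def Spec_mejor_imagen (imagenes : List String) (out : String) : Prop := out = mejor_imagen_alt imagenes
instance (imagenes : List String) (out : String) : Decidable (Spec_mejor_imagen imagenes out) := by unfold Spec_mejor_imagen; infer_instance

-- ===== CLAIM (what is proved, stated in full; the proofs are below) =====
def Claim_equal_mejor_imagen : Prop := ∀ (imagenes : List String), Dom_mejor_imagen imagenes → Spec_mejor_imagen imagenes (mejor_imagen imagenes)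

-- ===== LEMMAS AND PROOFS =====

-- B's single-pass loop equals: first good image, else the fallback, else the first truthy image.
theorem mejorImagenAltLoop_eq (l : List String) :
    ∀ fb : Option String,
      mejorImagenAltLoop l fb =
        match mejorImagenLoop1 l with
        | some img => img
        | none =>
          match fb.orElse (fun _ => mejorImagenLoop2 l) with
          | some f => f
          | none => "" := by
  induction l with
  | nil => intro fb; cases fb <;> simp [mejorImagenAltLoop, mejorImagenLoop1, mejorImagenLoop2]
  | cons img t ih =>
    intro fb
    simp only [mejorImagenAltLoop, mejorImagenLoop1, mejorImagenLoop2]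
    by_cases hg : img ≠ "" ∧ PySem.Str.isIn "/0000-" img = false
    · rw [if_pos hg, if_pos hg]
    · simp only [if_neg hg, ih]
      by_cases ht : img ≠ ""
      · cases fb with
        | none => simp [ht]
        | some f => simp [ht]
      · simp [ht]

-- ===== VERDICT (by name: the statement is the Claim_ definition above) =====
theorem mejor_imagen_spec : Claim_equal_mejor_imagen := by
  intro imagenes _
  unfold Spec_mejor_imagen mejor_imagen mejor_imagen_alt
  rw [mejorImagenAltLoop_eq]
  cases mejorImagenLoop1 imagenes <;> simp [Option.orElse]
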